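-- pv_equiv track=rewrite | github.com/kemtls/KEMTLS-TLS13Tamarin | src/kemtls/lemmas/oracles/kem_encaps_ordering.py | order_actions
-- ===== SOURCE A (Python) =====
-- from typing import Iterator, List
--
-- def order_actions(lines: List[str], lemma: str, *args) -> Iterator[str]:
--     if lemma != "kem_encaps_ordering":
--         return
--
--
--     p1: List[str] = []
--     p2: List[str] = []
--     p3: List[str] = []
--     tail: List[str] = []
--     for line in lines:
--         num: str = line.split(':')[0]
--         if "KemEncap(" in line:
--             p1.append(num)
--         elif "KemDecaps(" in line:
--             p2.append(num)
--         elif "kemencaps(" in line: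
--             p3.append(num)
--         else:
--             tail.append(num)
--
--     for num in p1 + p2 + p3 + tail:
--         yield num
-- ===== SOURCE B (Python) =====
-- from typing import Iterator, List
--
-- def order_actions(lines: List[str], lemma: str, *args) -> Iterator[str]:
--     if lemma != "kem_encaps_ordering":
--         return
--
--     def prio(line: str) -> int:
--         if "KemEncap(" in line:
--             return 0
--         if "KemDecaps(" in line:
--             return 1
--         if "kemencaps(" in line:
--             return 2
--         return 3
--
--     for line in sorted(lines, key=prio):
--         yield line.split(':')[0]
-- ===== Notes on version B (the rewrite author's own statement) =====
-- stated objective: idiomatic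
-- what changed: Replaces the four explicit bucket lists and their concatenation by a priority key function and one stable sorted(..., key=prio) pass over the lines.
import Mathlib
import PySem

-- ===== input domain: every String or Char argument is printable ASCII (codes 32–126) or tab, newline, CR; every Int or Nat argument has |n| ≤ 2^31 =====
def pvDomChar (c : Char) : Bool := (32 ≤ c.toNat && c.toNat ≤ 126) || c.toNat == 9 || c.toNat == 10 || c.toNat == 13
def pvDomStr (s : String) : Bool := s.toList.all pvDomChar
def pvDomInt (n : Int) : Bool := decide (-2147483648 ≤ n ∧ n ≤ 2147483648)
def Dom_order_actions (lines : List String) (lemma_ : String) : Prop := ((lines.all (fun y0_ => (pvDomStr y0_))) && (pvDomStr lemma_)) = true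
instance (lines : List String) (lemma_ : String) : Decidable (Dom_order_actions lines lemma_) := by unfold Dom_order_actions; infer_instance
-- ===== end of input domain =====

-- B replaces A's four bucket lists with a priority key and one stable sort: more idiomatic, same result.

-- ===== PORT A =====
def order_actions (lines : List String) (lemma_ : String) : List String :=
  if lemma_ ≠ "kem_encaps_ordering" then []
  else
    let st := lines.foldl (fun (st : List String × List String × List String × List String) line =>
      let num := ((PySem.Str.split? line ":").getD []).headD ""
      if PySem.Str.isIn "KemEncap(" line then (st.1 ++ [num], st.2.1, st.2.2.1, st.2.2.2)
      else if PySem.Str.isIn "KemDecaps(" line then (st.1, st.2.1 ++ [num], st.2.2.1, st.2.2.2)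
      else if PySem.Str.isIn "kemencaps(" line then (st.1, st.2.1, st.2.2.1 ++ [num], st.2.2.2)
      else (st.1, st.2.1, st.2.2.1, st.2.2.2 ++ [num]))
      ([], [], [], [])
    st.1 ++ st.2.1 ++ st.2.2.1 ++ st.2.2.2

-- ===== PORT B =====
def prioB (line : String) : Nat :=
  if PySem.Str.isIn "KemEncap(" line then 0
  else if PySem.Str.isIn "KemDecaps(" line then 1
  else if PySem.Str.isIn "kemencaps(" line then 2
  else 3

def order_actions_alt (lines : List String) (lemma_ : String) : List String :=
  if lemma_ ≠ "kem_encaps_ordering" then []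
  else (PySem.List.sorted lines (fun l => prioB l) false).map
    (fun line => ((PySem.Str.split? line ":").getD []).headD "")

-- ===== PRECONDITION & SPEC =====
def Spec_order_actions (lines : List String) (lemma_ : String) (out : List String) : Prop := out = order_actions_alt lines lemma_
instance (lines : List String) (lemma_ : String) (out : List String) : Decidable (Spec_order_actions lines lemma_ out) := by unfold Spec_order_actions; infer_instance

-- ===== CLAIM (what is proved, stated in full; the proofs are below) =====
def Claim_equal_order_actions : Prop := ∀ (lines : List String) (lemma_ : String), Dom_order_actions lines lemma_ → Spec_order_actions lines lemma_ (order_actions lines lemma_)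

-- ===== LEMMAS AND PROOFS =====

def nmOf (line : String) : String := ((PySem.Str.split? line ":").getD []).head?.getD ""

lemma insertBy_forall_before {α : Type} (before : α → α → Bool) (x : α) (ys : List α)
    (h : ∀ y ∈ ys, before x y = true) : PySem.List.insertBy before x ys = x :: ys := by
  cases ys with
  | nil => rfl
  | cons y t => simp [PySem.List.insertBy, h y (by simp)]

lemma insertBy_append_left {α : Type} (before : α → α → Bool) (x : α) (A B : List α)
    (hA : ∀ a ∈ A, before x a = false) :
    PySem.List.insertBy before x (A ++ B) = A ++ PySem.List.insertBy before x B := by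
  induction A with
  | nil => rfl
  | cons a t ih =>
    have ha := hA a (by simp)
    simp [List.cons_append, PySem.List.insertBy, ha, ih (fun a ha' => hA a (by simp [ha']))]

lemma insertBy_split {α : Type} (before : α → α → Bool) (x : α) (A B : List α)
    (hA : ∀ a ∈ A, before x a = false) (hB : ∀ b ∈ B, before x b = true) :
    PySem.List.insertBy before x (A ++ B) = A ++ x :: B := by
  rw [insertBy_append_left before x A B hA, insertBy_forall_before before x B hB]

lemma prioB_cases (x : String) : prioB x = 0 ∨ prioB x = 1 ∨ prioB x = 2 ∨ prioB x = 3 := by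
  unfold prioB; split_ifs <;> simp

lemma sorted_prioB (l : List String) :
    PySem.List.sorted l (fun x => prioB x) false =
      l.filter (fun x => prioB x == 0) ++ l.filter (fun x => prioB x == 1) ++
      l.filter (fun x => prioB x == 2) ++ l.filter (fun x => prioB x == 3) := by
  rw [PySem.List.sorted_eq_foldl_insertBy]
  induction l using List.reverseRecOn with
  | nil => rfl
  | append_singleton l x ih =>
    rw [List.foldl_append, List.foldl_cons, List.foldl_nil, ih]
    have hmem : ∀ (j : Nat) (a : String), a ∈ l.filter (fun x => prioB x == j) → prioB a = j := by
      intro j a ha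
      have := (List.mem_filter.mp ha).2
      simpa using this
    rcases prioB_cases x with hx | hx | hx | hx
    · rw [show l.filter (fun x => prioB x == 0) ++ l.filter (fun x => prioB x == 1) ++
            l.filter (fun x => prioB x == 2) ++ l.filter (fun x => prioB x == 3) =
          l.filter (fun x => prioB x == 0) ++ (l.filter (fun x => prioB x == 1) ++
            l.filter (fun x => prioB x == 2) ++ l.filter (fun x => prioB x == 3)) by
          simp [List.append_assoc]]
      rw [insertBy_split _ x (l.filter (fun x => prioB x == 0)) _
        (by intro a ha; simp [hmem 0 a ha, hx])
        (by intro b hb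
            simp only [List.mem_append] at hb
            rcases hb with (hb | hb) | hb <;>
              simp [hmem _ b hb, hx])]
      simp [List.filter_append, hx, List.append_assoc]
    · rw [show l.filter (fun x => prioB x == 0) ++ l.filter (fun x => prioB x == 1) ++
            l.filter (fun x => prioB x == 2) ++ l.filter (fun x => prioB x == 3) =
          (l.filter (fun x => prioB x == 0) ++ l.filter (fun x => prioB x == 1)) ++
            (l.filter (fun x => prioB x == 2) ++ l.filter (fun x => prioB x == 3)) by
          simp [List.append_assoc]]
      rw [insertBy_split _ x _ _
        (by intro a ha
            simp only [List.mem_append] at ha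
            rcases ha with ha | ha <;> simp [hmem _ a ha, hx])
        (by intro b hb
            simp only [List.mem_append] at hb
            rcases hb with hb | hb <;> simp [hmem _ b hb, hx])]
      simp [List.filter_append, hx, List.append_assoc]
    · rw [show l.filter (fun x => prioB x == 0) ++ l.filter (fun x => prioB x == 1) ++
            l.filter (fun x => prioB x == 2) ++ l.filter (fun x => prioB x == 3) =
          (l.filter (fun x => prioB x == 0) ++ l.filter (fun x => prioB x == 1) ++
            l.filter (fun x => prioB x == 2)) ++ l.filter (fun x => prioB x == 3) by
          simp [List.append_assoc]]
      rw [insertBy_split _ x _ _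
        (by intro a ha
            simp only [List.mem_append] at ha
            rcases ha with (ha | ha) | ha <;> simp [hmem _ a ha, hx])
        (by intro b hb; simp [hmem _ b hb, hx])]
      simp [List.filter_append, hx, List.append_assoc]
    · rw [show l.filter (fun x => prioB x == 0) ++ l.filter (fun x => prioB x == 1) ++
            l.filter (fun x => prioB x == 2) ++ l.filter (fun x => prioB x == 3) =
          (l.filter (fun x => prioB x == 0) ++ l.filter (fun x => prioB x == 1) ++
            l.filter (fun x => prioB x == 2) ++ l.filter (fun x => prioB x == 3)) ++ [] by simp]
      rw [insertBy_split _ x _ []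
        (by intro a ha
            simp only [List.mem_append] at ha
            rcases ha with ((ha | ha) | ha) | ha <;> simp [hmem _ a ha, hx])
        (by intro b hb; simp at hb)]
      simp [List.filter_append, hx, List.append_assoc]

lemma foldA (l : List String) :
    l.foldl (fun (st : List String × List String × List String × List String) line =>
      let num := ((PySem.Str.split? line ":").getD []).headD ""
      if PySem.Str.isIn "KemEncap(" line then (st.1 ++ [num], st.2.1, st.2.2.1, st.2.2.2)
      else if PySem.Str.isIn "KemDecaps(" line then (st.1, st.2.1 ++ [num], st.2.2.1, st.2.2.2)
      else if PySem.Str.isIn "kemencaps(" line then (st.1, st.2.1, st.2.2.1 ++ [num], st.2.2.2)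
      else (st.1, st.2.1, st.2.2.1, st.2.2.2 ++ [num]))
      ([], [], [], []) =
    ((l.filter (fun x => prioB x == 0)).map nmOf, (l.filter (fun x => prioB x == 1)).map nmOf,
     (l.filter (fun x => prioB x == 2)).map nmOf, (l.filter (fun x => prioB x == 3)).map nmOf) := by
  induction l using List.reverseRecOn with
  | nil => rfl
  | append_singleton l x ih =>
    rw [List.foldl_append, List.foldl_cons, List.foldl_nil, ih]
    cases h0 : PySem.Str.isIn "KemEncap(" x <;>
      cases h1 : PySem.Str.isIn "KemDecaps(" x <;>
        cases h2 : PySem.Str.isIn "kemencaps(" x <;>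
          (simp at h0 h1 h2
           simp [List.filter_append, prioB, nmOf, PySem.Str.isIn_eq, h0, h1, h2])

lemma nmOf_eq : nmOf = fun line => ((PySem.Str.split? line ":").getD []).headD "" := by
  funext line
  simp [nmOf]

-- ===== VERDICT (by name: the statement is the Claim_ definition above) =====
theorem order_actions_spec : Claim_equal_order_actions := by
  intro lines lemma_ _
  unfold Spec_order_actions order_actions order_actions_alt
  by_cases h : lemma_ ≠ "kem_encaps_ordering"
  · simp [h]
  · simp only [h, if_false]
    rw [foldA, sorted_prioB]
    rw [nmOf_eq]
    simp only [List.map_append, List.append_assoc]
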